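-- pv_equiv track=rewrite | github.com/SlonSchool/MadTeaParty-winter2016 | 4.py | dictiKeysGenerator
-- ===== SOURCE A (Python) =====
-- def dictiKeysGenerator(zeroValue, oneValue):
--     # generates keys like '...', '..O' etc using binary numbers from 0 to 7
--     numbers = range(0, 8)
--     binNumbers = []
--     for elem in numbers:
--         binary = bin(elem)[2::]
--         while len(binary) < 3:
--             binary = '0' + binary
--         binNumbers.append(binary)
--     keys = []
--     symbol = {'1': oneValue, '0': zeroValue}
--     for elem in binNumbers:
--         keyElem = ''
--         for char in elem:
--             keyElem += symbol[char]
--         keys.append(keyElem)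
--     return keys
-- ===== SOURCE B (Python) =====
-- from itertools import product
--
-- def dictiKeysGenerator(zeroValue, oneValue):
--     # one cartesian-product traversal instead of binary-string building + dict lookups
--     return [''.join(t) for t in product((zeroValue, oneValue), repeat=3)]
-- ===== Notes on version B (the rewrite author's own statement) =====
-- stated objective: idiomatic
-- what changed: Replaces the binary-string construction, zero-padding loop and per-character dict lookup with a single itertools.product((zeroValue, oneValue), repeat=3) whose order matches binary counting.
import Mathlib
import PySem

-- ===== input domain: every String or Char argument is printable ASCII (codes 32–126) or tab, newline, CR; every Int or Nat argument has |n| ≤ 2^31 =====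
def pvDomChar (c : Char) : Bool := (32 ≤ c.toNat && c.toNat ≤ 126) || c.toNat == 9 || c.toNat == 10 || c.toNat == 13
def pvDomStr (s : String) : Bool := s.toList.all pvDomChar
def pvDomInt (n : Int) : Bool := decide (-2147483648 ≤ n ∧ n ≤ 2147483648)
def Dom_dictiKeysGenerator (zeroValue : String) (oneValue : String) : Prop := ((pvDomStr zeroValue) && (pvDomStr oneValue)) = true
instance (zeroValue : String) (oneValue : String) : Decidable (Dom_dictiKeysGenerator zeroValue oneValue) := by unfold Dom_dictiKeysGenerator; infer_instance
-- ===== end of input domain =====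

-- B replaces A's binary-string building, zero-padding loop and per-character dict
-- lookups with a single cartesian-product traversal over (zeroValue, oneValue)^3 (idiomatic).


-- ===== PORT A =====
-- Python str values handled character-wise are List Char here (PySem style); exact for bin/padding.
-- bin(n)[2:] for n ≥ 0 (exact on the 0..7 values A feeds it): MSB-first binary digits
def pvBinChars : Nat → List Char
  | 0 => []
  | (n+1) => pvBinChars ((n+1)/2) ++ [if (n+1) % 2 = 1 then '1' else '0']

def pvBin (n : Int) : List Char := if n = 0 then ['0'] else pvBinChars n.toNat

-- the `while len(binary) < 3: binary = '0' + binary` loop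
def pvPad3 (l : List Char) : List Char :=
  if l.length < 3 then pvPad3 ('0' :: l) else l
termination_by 3 - l.length
decreasing_by simp; omega

def dictiKeysGenerator (zeroValue : String) (oneValue : String) : List String :=
  let numbers := PySem.List.pyRange 0 8 1
  let binNumbers := numbers.foldl (fun acc elem => acc ++ [pvPad3 (pvBin elem)]) []
  -- symbol = {'1': oneValue, '0': zeroValue}; the looked-up keys are always present, so getD's default is never returned
  let symbol : PySem.Dict Char String := PySem.Dict.ofList [('1', oneValue), ('0', zeroValue)]
  binNumbers.foldl (fun keys elem =>
    keys ++ [elem.foldl (fun keyElem char => keyElem ++ PySem.Dict.getD symbol char "") ""]) []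

-- ===== PORT B =====
def dictiKeysGenerator_alt (zeroValue : String) (oneValue : String) : List String :=
  let vals := [zeroValue, oneValue]
  vals.flatMap fun a => vals.flatMap fun b => vals.map fun c => a ++ b ++ c

-- ===== PRECONDITION & SPEC =====
def Spec_dictiKeysGenerator (zeroValue : String) (oneValue : String) (out : List String) : Prop := out = dictiKeysGenerator_alt zeroValue oneValue
instance (zeroValue : String) (oneValue : String) (out : List String) : Decidable (Spec_dictiKeysGenerator zeroValue oneValue out) := by unfold Spec_dictiKeysGenerator; infer_instance

-- ===== CLAIM (what is proved, stated in full; the proofs are below) =====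
def Claim_equal_dictiKeysGenerator : Prop := ∀ (zeroValue : String) (oneValue : String), Dom_dictiKeysGenerator zeroValue oneValue → Spec_dictiKeysGenerator zeroValue oneValue (dictiKeysGenerator zeroValue oneValue)

-- ===== LEMMAS AND PROOFS =====
-- A's first loop is a closed computation: it always produces the eight padded binaries
theorem pvBinNumbers_eq :
    (PySem.List.pyRange 0 8 1).foldl (fun acc elem => acc ++ [pvPad3 (pvBin elem)]) [] =
      [['0','0','0'], ['0','0','1'], ['0','1','0'], ['0','1','1'],
       ['1','0','0'], ['1','0','1'], ['1','1','0'], ['1','1','1']] := by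
  have p0 : pvPad3 (pvBin 0) = ['0','0','0'] := by rw [pvPad3, pvPad3, pvPad3]; decide
  have p1 : pvPad3 (pvBin 1) = ['0','0','1'] := by rw [pvPad3, pvPad3, pvPad3]; simp [pvBin, pvBinChars]
  have p2 : pvPad3 (pvBin 2) = ['0','1','0'] := by rw [pvPad3, pvPad3]; simp [pvBin, pvBinChars]
  have p3 : pvPad3 (pvBin 3) = ['0','1','1'] := by rw [pvPad3, pvPad3]; simp [pvBin, pvBinChars]
  have p4 : pvPad3 (pvBin 4) = ['1','0','0'] := by rw [pvPad3]; simp [pvBin, pvBinChars]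
  have p5 : pvPad3 (pvBin 5) = ['1','0','1'] := by rw [pvPad3]; simp [pvBin, pvBinChars]
  have p6 : pvPad3 (pvBin 6) = ['1','1','0'] := by rw [pvPad3]; simp [pvBin, pvBinChars]
  have p7 : pvPad3 (pvBin 7) = ['1','1','1'] := by rw [pvPad3]; simp [pvBin, pvBinChars]
  rw [show PySem.List.pyRange 0 8 1 = ([0, 1, 2, 3, 4, 5, 6, 7] : List Int) from by decide]
  simp only [List.foldl]
  rw [p0, p1, p2, p3, p4, p5, p6, p7]
  rfl

-- the two dictionary lookups A ever performs
theorem pvSymbol_zero (zeroValue oneValue : String) :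
    PySem.Dict.getD (PySem.Dict.ofList [('1', oneValue), ('0', zeroValue)]) '0' "" = zeroValue := rfl

theorem pvSymbol_one (zeroValue oneValue : String) :
    PySem.Dict.getD (PySem.Dict.ofList [('1', oneValue), ('0', zeroValue)]) '1' "" = oneValue := rfl

-- ===== VERDICT (by name: the statement is the Claim_ definition above) =====
theorem dictiKeysGenerator_spec : Claim_equal_dictiKeysGenerator := by
  intro z o _
  show dictiKeysGenerator z o = dictiKeysGenerator_alt z o
  simp only [dictiKeysGenerator, dictiKeysGenerator_alt]
  rw [pvBinNumbers_eq]
  simp only [List.foldl, List.flatMap, List.map, pvSymbol_zero, pvSymbol_one]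
  simp [String.append_assoc]
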